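-- pv_equiv track=rewrite | github.com/MarwanSaqr/Bio_Informatics_GUI | GUI.py | naive_overlap_map
-- ===== SOURCE A (Python) =====
-- def naive_overlap(a, b, min_length):
--     start = 0
--     while True:
--         start = a.find(b[:min_length], start)  # Find b[:min_length] in a
--         if start == -1:
--             return 0
--         # Check if the suffix of 'a' from 'start' matches the prefix of 'b'
--         if b.startswith(a[start:]):
--             return len(a) - start
--         start += 1
--
-- def naive_overlap_map(reads, k):
--     overlaps = {}
--     for a in reads:
--         for b in reads:
--             if a != b:  # Avoid self-overlaps
--                 olen = naive_overlap(a, b, k)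
--                 if olen > 0:
--                     overlaps[(a, b)] = olen
--     return overlaps
-- ===== SOURCE B (Python) =====
-- def naive_overlap_map(reads, k):
--     overlaps = {}
--     for a in reads:
--         for b in reads:
--             if a != b:  # Avoid self-overlaps
--                 # longest l with suffix of a == prefix of b, l at least len(b[:k])
--                 m = len(b[:k])
--                 for l in range(min(len(a), len(b)), max(m, 1) - 1, -1):
--                     if a.endswith(b[:l]):
--                         overlaps[(a, b)] = l
--                         break
--     return overlaps
-- ===== Notes on version B (the rewrite author's own statement) =====
-- stated objective: alternative
-- what changed: Per pair, A repeatedly substring-searches b[:k] inside a with find and re-checks startswith; B instead scans candidate overlap lengths from the longest down with a single endswith test per length, returning the first hit.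
import Mathlib
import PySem

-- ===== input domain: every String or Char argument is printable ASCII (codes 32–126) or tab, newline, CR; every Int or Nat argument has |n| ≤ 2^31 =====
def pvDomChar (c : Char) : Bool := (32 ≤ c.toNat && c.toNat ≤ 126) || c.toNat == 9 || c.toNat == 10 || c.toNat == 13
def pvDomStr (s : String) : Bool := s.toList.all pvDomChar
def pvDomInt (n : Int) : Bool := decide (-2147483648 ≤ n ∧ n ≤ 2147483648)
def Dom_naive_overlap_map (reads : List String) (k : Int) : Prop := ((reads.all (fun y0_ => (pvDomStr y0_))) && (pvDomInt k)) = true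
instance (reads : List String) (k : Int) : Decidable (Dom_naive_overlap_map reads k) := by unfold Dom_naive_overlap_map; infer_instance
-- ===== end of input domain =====

-- B replaces A's find-based substring search per pair by a descending scan over
-- candidate overlap lengths with one endswith test each (alternative, same cost class).

-- ===== PORT A =====
-- the 'while True' loop of naive_overlap; fuel a.length + 2 is enough (start grows each turn, stays ≤ len(a))
def nolLoop (al bl pat : List Char) : Nat → Int → Int
  | 0, _ => 0
  | fuel+1, start =>
    let f := PySem.Chars.findFrom al pat start none
    if f = -1 then 0
    else if PySem.Chars.startswith bl (PySem.List.slice al (some f) none) then (al.length : Int) - f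
    else nolLoop al bl pat fuel (f + 1)

def naive_overlap (a b : String) (min_length : Int) : Int :=
  nolLoop a.toList b.toList (PySem.List.slice b.toList none (some min_length)) (a.toList.length + 2) 0

def naive_overlap_map (reads : List String) (k : Int) : List (String × String × Int) :=
  ((reads.foldl (fun d a => reads.foldl (fun d b =>
      if a ≠ b then
        let olen := naive_overlap a b k
        if olen > 0 then d.insert (a, b) olen else d
      else d) d)
    (PySem.Dict.empty : PySem.Dict (String × String) Int)).items).map (fun p => (p.1.1, p.1.2, p.2))

-- ===== PORT B =====
-- first l in range(min(len a, len b), max(m, 1) - 1, -1) with a.endswith(b[:l]), where m = len(b[:k])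
def nolAlt (al bl : List Char) (k : Int) : Option Int :=
  (PySem.List.pyRange (min (al.length : Int) (bl.length : Int))
      (max ((PySem.List.slice bl none (some k)).length : Int) 1 - 1) (-1)).find?
    (fun l => PySem.Chars.endswith al (PySem.List.slice bl none (some l)))

def naive_overlap_map_alt (reads : List String) (k : Int) : List (String × String × Int) :=
  ((reads.foldl (fun d a => reads.foldl (fun d b =>
      if a ≠ b then
        match nolAlt a.toList b.toList k with
        | some l => d.insert (a, b) l
        | none => d
      else d) d)
    (PySem.Dict.empty : PySem.Dict (String × String) Int)).items).map (fun p => (p.1.1, p.1.2, p.2))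

-- ===== PRECONDITION & SPEC =====
def Spec_naive_overlap_map (reads : List String) (k : Int) (out : List (String × String × Int)) : Prop := out = naive_overlap_map_alt reads k
instance (reads : List String) (k : Int) (out : List (String × String × Int)) : Decidable (Spec_naive_overlap_map reads k out) := by unfold Spec_naive_overlap_map; infer_instance

-- ===== CLAIM (what is proved, stated in full; the proofs are below) =====
def Claim_equal_naive_overlap_map : Prop := ∀ (reads : List String) (k : Int), Dom_naive_overlap_map reads k → Spec_naive_overlap_map reads k (naive_overlap_map reads k)

-- ===== LEMMAS AND PROOFS =====

-- the suffix/prefix match condition at cut position f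
def QB (al bl pat : List Char) (f : Nat) : Bool :=
  decide (pat <+: al.drop f ∧ al.drop f <+: bl)

theorem QB_iff {al bl pat : List Char} {f : Nat} :
    QB al bl pat f = true ↔ (pat <+: al.drop f ∧ al.drop f <+: bl) := by simp [QB]

theorem find?_range'_eq_none {p : Nat → Bool} {s n : Nat}
    (h : ∀ g, s ≤ g → g < s + n → p g = false) : (List.range' s n).find? p = none := by
  apply List.find?_eq_none.mpr
  intro x hx
  simp only [List.mem_range'_1] at hx
  simp [h x hx.1 hx.2]

theorem find?_range'_eq_some {p : Nat → Bool} {s n f : Nat}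
    (hf : s ≤ f) (hlt : f < s + n) (hp : p f = true)
    (hmin : ∀ g, s ≤ g → g < f → p g = false) : (List.range' s n).find? p = some f := by
  induction n generalizing s with
  | zero => omega
  | succ n ih =>
    rw [List.range'_succ, List.find?_cons]
    by_cases hsf : s = f
    · subst hsf; simp [hp]
    · have hps : p s = false := hmin s le_rfl (by omega)
      simp only [hps]
      exact ih (by omega) (by omega) (fun g h1 h2 => hmin g (by omega) h2)

theorem find?_range'_min {p : Nat → Bool} {s n f : Nat}
    (h : (List.range' s n).find? p = some f) :
    p f = true ∧ s ≤ f ∧ f < s + n ∧ ∀ g, s ≤ g → g < f → p g = false := by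
  induction n generalizing s with
  | zero => simp at h
  | succ n ih =>
    rw [List.range'_succ, List.find?_cons] at h
    by_cases hps : p s = true
    · simp only [hps] at h
      rw [Option.some_inj] at h
      subst h
      exact ⟨hps, le_rfl, by omega, fun g h1 h2 => by omega⟩
    · rw [Bool.not_eq_true] at hps
      simp only [hps] at h
      obtain ⟨h1, h2, h3, h4⟩ := ih h
      refine ⟨h1, by omega, by omega, fun g hg1 hg2 => ?_⟩
      rcases Nat.eq_or_lt_of_le hg1 with rfl | hgs
      · exact hps
      · exact h4 g hgs hg2

-- b[:k] is a prefix of b (for every integer k)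
theorem slice_to_prefix (bl : List Char) (k : Int) :
    PySem.List.slice bl none (some k) <+: bl := by
  by_cases hk : 0 ≤ k
  · rw [PySem.List.slice_to bl hk]; exact List.take_prefix _ _
  · have hk' : 0 < (-k).toNat := by omega
    have he : k = -(((-k).toNat : Nat) : Int) := by omega
    rw [he, PySem.List.slice_to_neg_natCast bl (-k).toNat hk']
    exact List.take_prefix _ _

-- the bridge: a.endswith(b[:l]) at candidate length l ↔ the cut condition at f = len(a) - l
theorem bridgeR (al bl pat : List Char) (hpat : pat <+: bl) (l : Nat)
    (h1 : 1 ≤ l) (hm : pat.length ≤ l) (hla : l ≤ al.length) (hlb : l ≤ bl.length) :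
    (PySem.Chars.endswith al (PySem.List.slice bl none (some (l : Int))) = true)
      ↔ QB al bl pat (al.length - l) = true := by
  rw [PySem.List.slice_to bl (by exact_mod_cast Nat.zero_le l : (0:Int) ≤ (l:Int))]
  rw [Int.toNat_natCast]
  rw [PySem.Chars.endswith_iff, QB_iff]
  have hlen_take : (bl.take l).length = l := by simp [hlb]
  constructor
  · intro hsuf
    have heq : bl.take l = al.drop (al.length - l) := by
      have := List.suffix_iff_eq_drop.mp hsuf
      rw [hlen_take] at this
      exact this
    refine ⟨?_, ?_⟩
    · rw [← heq]
      exact List.prefix_of_prefix_length_le hpat (List.take_prefix _ _) (by omega)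
    · rw [← heq]; exact List.take_prefix _ _
  · rintro ⟨-, hsuf⟩
    have hlend : (al.drop (al.length - l)).length = l := by simp; omega
    have heq : al.drop (al.length - l) = bl.take l := by
      have := List.prefix_iff_eq_take.mp hsuf
      rw [hlend] at this
      exact this
    rw [← heq]
    exact List.drop_suffix _ _

-- characterization of A's while loop: first cut f (left to right) with
-- pat occurring at f and a[f:] a prefix of b
theorem nolLoop_char (al bl pat : List Char) :
    ∀ (fuel start : Nat), start ≤ al.length → al.length + 2 ≤ start + fuel →
    nolLoop al bl pat fuel (start : Int) =
      match (List.range' start (al.length + 1 - start)).find? (QB al bl pat) with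
      | some f => (al.length : Int) - f
      | none => 0 := by
  intro fuel
  induction fuel with
  | zero => intro start h1 h2; omega
  | succ fuel ih =>
    intro start hsle hfuel
    rw [nolLoop]
    by_cases hF : PySem.Chars.findFrom al pat (start : Int) none = -1
    · have hnoinf : ¬ pat <:+: al.drop start :=
        (PySem.Chars.findFrom_natCast_eq_neg_one_iff al pat start hsle).mp hF
      have hnone : (List.range' start (al.length + 1 - start)).find? (QB al bl pat) = none := by
        apply find?_range'_eq_none
        intro g hg1 hg2
        rw [← Bool.not_eq_true, QB_iff]
        rintro ⟨hpre, -⟩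
        apply hnoinf
        rw [← PySem.Chars.isIn_iff_infix, ← PySem.Chars.exists_prefix_drop_iff_isIn]
        refine ⟨g - start, ?_⟩
        rw [List.drop_drop, show start + (g - start) = g by omega]
        exact hpre
      simp [hF, hnone]
    · obtain ⟨hge, hpre, hmin⟩ := PySem.Chars.findFrom_natCast_spec al pat start hsle hF
      set fI := PySem.Chars.findFrom al pat (start : Int) none with hfIdef
      have h0f : 0 ≤ fI := le_trans (by exact_mod_cast Nat.zero_le start) hge
      have hfla : fI.toNat ≤ al.length := by
        have hrw := PySem.Chars.findFrom_natCast al pat start hsle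
        rw [← hfIdef] at hrw
        by_cases hc : PySem.Chars.find (al.drop start) pat = -1
        · rw [hrw] at hF; simp [hc] at hF
        · have hle := PySem.Chars.find_le_length (al.drop start) pat
          rw [List.length_drop] at hle
          rw [hrw]; simp only [hc]
          omega
      have hslice : PySem.List.slice al (some fI) none = al.drop fI.toNat :=
        PySem.List.slice_from al h0f
      simp only [if_neg hF, hslice]
      by_cases hsw : PySem.Chars.startswith bl (al.drop fI.toNat) = true
      · rw [if_pos hsw]
        have hQ : QB al bl pat fI.toNat = true :=
          QB_iff.mpr ⟨hpre, (PySem.Chars.startswith_iff _ _).mp hsw⟩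
        have hminQ : ∀ g, start ≤ g → g < fI.toNat → QB al bl pat g = false := by
          intro g hg1 hg2
          rw [← Bool.not_eq_true, QB_iff]
          rintro ⟨hp, -⟩
          exact hmin g hg1 hg2 hp
        rw [find?_range'_eq_some (by omega) (by omega) hQ hminQ]
        simp [Int.toNat_of_nonneg h0f]
      · rw [if_neg hsw]
        have hflt : fI.toNat < al.length := by
          rcases Nat.lt_or_ge fI.toNat al.length with h | h
          · exact h
          · exfalso
            have : fI.toNat = al.length := by omega
            rw [this, List.drop_length] at hsw
            exact hsw ((PySem.Chars.startswith_iff _ _).mpr (List.nil_prefix))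
        have hcast : fI + 1 = ((fI.toNat + 1 : Nat) : Int) := by omega
        rw [hcast, ih (fI.toNat + 1) (by omega) (by omega)]
        have hsplit : List.range' start (al.length + 1 - start)
            = List.range' start (fI.toNat + 1 - start) ++ List.range' (fI.toNat + 1) (al.length + 1 - (fI.toNat + 1)) := by
          rw [show al.length + 1 - start = (fI.toNat + 1 - start) + (al.length + 1 - (fI.toNat + 1)) by omega,
            ← List.range'_append_1, show start + (fI.toNat + 1 - start) = fI.toNat + 1 by omega]
        rw [hsplit, List.find?_append]
        have hnone : (List.range' start (fI.toNat + 1 - start)).find? (QB al bl pat) = none := by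
          apply find?_range'_eq_none
          intro g hg1 hg2
          rw [← Bool.not_eq_true, QB_iff]
          rintro ⟨hp, hs⟩
          rcases Nat.lt_or_ge g fI.toNat with h | h
          · exact hmin g hg1 h hp
          · have : g = fI.toNat := by omega
            subst this
            exact hsw ((PySem.Chars.startswith_iff _ _).mpr hs)
        rw [hnone, Option.none_or]

-- the key pointwise fact: B's descending length scan returns exactly
-- (if A's overlap is positive then some of it else none)
theorem key (al bl : List Char) (k : Int) :
    nolAlt al bl k =
      if 0 < nolLoop al bl (PySem.List.slice bl none (some k)) (al.length + 2) 0
      then some (nolLoop al bl (PySem.List.slice bl none (some k)) (al.length + 2) 0)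
      else none := by
  have hpat : PySem.List.slice bl none (some k) <+: bl := slice_to_prefix bl k
  set pat := PySem.List.slice bl none (some k) with hpatdef
  have hmlb : pat.length ≤ bl.length := hpat.length_le
  have hA := nolLoop_char al bl pat (al.length + 2) 0 (Nat.zero_le _) (by omega)
  rw [Nat.cast_zero, Nat.sub_zero] at hA
  unfold nolAlt
  rw [← hpatdef]
  have hmax1 : (1:Int) ≤ max (pat.length:Int) 1 := le_max_right _ _
  have hmaxm : ((pat.length:Int)) ≤ max (pat.length:Int) 1 := le_max_left _ _
  have hminl : min ((al.length:Int)) ((bl.length:Int)) ≤ (al.length:Int) := min_le_left _ _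
  have hminr : min ((al.length:Int)) ((bl.length:Int)) ≤ (bl.length:Int) := min_le_right _ _
  cases hFnd : (List.range' 0 (al.length + 1)).find? (QB al bl pat) with
  | none =>
    rw [hFnd] at hA
    have hA0 : nolLoop al bl pat (al.length + 2) 0 = 0 := hA
    rw [hA0, if_neg (by omega : ¬ (0:Int) < 0)]
    apply List.find?_eq_none.mpr
    intro l hl hR
    rw [PySem.List.mem_pyRange_neg_one] at hl
    obtain ⟨hl1, hl2⟩ := hl
    have hlcast : l = ((l.toNat : Nat) : Int) := by omega
    rw [hlcast] at hR
    have hQ := (bridgeR al bl pat hpat l.toNat (by omega) (by omega) (by omega) (by omega)).mp hR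
    have hno := List.find?_eq_none.mp hFnd (al.length - l.toNat)
      (List.mem_range'_1.mpr ⟨Nat.zero_le _, by omega⟩)
    exact hno hQ
  | some f =>
    rw [hFnd] at hA
    have hAv : nolLoop al bl pat (al.length + 2) 0 = (al.length : Int) - f := hA
    obtain ⟨hQf, -, hflt, hfmin⟩ := find?_range'_min hFnd
    obtain ⟨hpre, hsuf⟩ := QB_iff.mp hQf
    have hfle : f ≤ al.length := by omega
    have hl0lb : al.length - f ≤ bl.length := by
      have := hsuf.length_le; simp only [List.length_drop] at this; omega
    have hml0 : pat.length ≤ al.length - f := by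
      have := hpre.length_le; simp only [List.length_drop] at this; omega
    by_cases hfla : f = al.length
    · rw [hAv, hfla, if_neg (by omega : ¬ (0:Int) < (al.length:Int) - (al.length:Int))]
      apply List.find?_eq_none.mpr
      intro l hl hR
      rw [PySem.List.mem_pyRange_neg_one] at hl
      obtain ⟨hl1, hl2⟩ := hl
      have hlcast : l = ((l.toNat : Nat) : Int) := by omega
      rw [hlcast] at hR
      have hQ := (bridgeR al bl pat hpat l.toNat (by omega) (by omega) (by omega) (by omega)).mp hR
      have hfalse := hfmin (al.length - l.toNat) (Nat.zero_le _) (by omega)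
      rw [hQ] at hfalse
      exact absurd hfalse (by simp)
    · have hfltla : f < al.length := by omega
      rw [hAv, if_pos (by omega : (0:Int) < (al.length:Int) - (f:Int))]
      have hminge : ((al.length - f : Nat) : Int) ≤ min (al.length:Int) (bl.length:Int) :=
        le_min (by omega) (by omega)
      have hmaxle : max ((pat.length:Int)) 1 ≤ ((al.length - f : Nat) : Int) :=
        max_le (by omega) (by omega)
      rw [PySem.List.pyRange_neg_one_eq_reverse,
        show max ((pat.length:Int)) 1 - 1 + 1 = max ((pat.length:Int)) 1 by ring]
      have hsplit : PySem.List.pyRange (max ((pat.length:Int)) 1) (min (al.length:Int) (bl.length:Int) + 1) 1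
          = PySem.List.pyRange (max ((pat.length:Int)) 1) ((al.length - f : Nat) : Int) 1
            ++ (((al.length - f : Nat) : Int) :: PySem.List.pyRange (((al.length - f : Nat) : Int) + 1) (min (al.length:Int) (bl.length:Int) + 1) 1) := by
        rw [← PySem.List.pyRange_one_cons (by omega)]
        exact PySem.List.pyRange_one_append _ _ _ hmaxle (by omega)
      rw [hsplit, List.reverse_append, List.reverse_cons, List.find?_append, List.find?_append]
      have hupper : (PySem.List.pyRange (((al.length - f : Nat) : Int) + 1) (min (al.length:Int) (bl.length:Int) + 1) 1).reverse.find?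
          (fun l => PySem.Chars.endswith al (PySem.List.slice bl none (some l))) = none := by
        apply List.find?_eq_none.mpr
        intro l hl hR
        rw [List.mem_reverse, PySem.List.mem_pyRange_one] at hl
        obtain ⟨hl1, hl2⟩ := hl
        have hlcast : l = ((l.toNat : Nat) : Int) := by omega
        rw [hlcast] at hR
        have hQ := (bridgeR al bl pat hpat l.toNat (by omega) (by omega) (by omega) (by omega)).mp hR
        have hfalse := hfmin (al.length - l.toNat) (Nat.zero_le _) (by omega)
        rw [hQ] at hfalse
        exact absurd hfalse (by simp)
      rw [hupper, Option.none_or]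
      have hRl0 : PySem.Chars.endswith al (PySem.List.slice bl none (some ((al.length - f : Nat) : Int))) = true :=
        (bridgeR al bl pat hpat (al.length - f) (by omega) hml0 (by omega) hl0lb).mpr
          (by rw [show al.length - (al.length - f) = f by omega]; exact hQf)
      simp only [List.find?_cons, hRl0, Option.some_or]
      congr 1
      omega

theorem keyS (a b : String) (k : Int) :
    nolAlt a.toList b.toList k =
      if 0 < naive_overlap a b k then some (naive_overlap a b k) else none :=
  key a.toList b.toList k

-- ===== VERDICT (by name: the statement is the Claim_ definition above) =====
theorem naive_overlap_map_spec : Claim_equal_naive_overlap_map := by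
  intro reads k _
  unfold Spec_naive_overlap_map naive_overlap_map naive_overlap_map_alt
  have hbody : (fun (d : PySem.Dict (String × String) Int) (a : String) => reads.foldl (fun d b =>
      if a ≠ b then
        let olen := naive_overlap a b k
        if olen > 0 then d.insert (a, b) olen else d
      else d) d)
      = (fun d a => reads.foldl (fun d b =>
      if a ≠ b then
        match nolAlt a.toList b.toList k with
        | some l => d.insert (a, b) l
        | none => d
      else d) d) := by
    funext d a
    congr 1
    funext d b
    by_cases hab : a = b
    · simp [hab]
    · simp only [hab, ne_eq, not_false_eq_true, if_true]
      rw [keyS a b k]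
      by_cases hpos : naive_overlap a b k > 0
      · rw [if_pos hpos, if_pos hpos]
      · rw [if_neg hpos, if_neg hpos]
  rw [hbody]
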